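-- pv_equiv track=rewrite | github.com/miliar/Code_Jam_Webscraper | solutions_python/Problem_59/405.py | count_mkdir
-- ===== SOURCE A (Python) =====
-- def dir_len(dir):
--     return dir.count('/')
--
-- def take_n(list_dir, n):
--     return '/'+'/'.join([list_dir[x] for x in range(n)])
--
-- def count_mkdir(o_list,new_dir):
--     num_dir = dir_len(new_dir)
--     s_dir = new_dir.split('/')[1:]
--     n = len(o_list)
--     if(num_dir>n):
--         sum_mkdir = num_dir-n
--     else:
--         n = num_dir
--         sum_mkdir = 0
--     while(n>0):
--         part = take_n(s_dir,n)
--         if part in o_list[n-1]: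
--             return sum_mkdir
--         sum_mkdir+=1
--         n-=1
--     return num_dir
-- ===== SOURCE B (Python) =====
-- def count_mkdir(o_list, new_dir):
--     num_dir = new_dir.count('/')
--     parts = new_dir.split('/')[1:]
--     prefix = ''
--     deepest = 0
--     for i in range(min(num_dir, len(o_list))):
--         prefix += '/' + parts[i]
--         if prefix in o_list[i]:
--             deepest = i + 1
--     return num_dir - deepest
-- ===== Notes on version B (the rewrite author's own statement) =====
-- stated objective: simpler
-- what changed: Replaces A's backward countdown loop with early return and per-step prefix rebuilding via take_n by a single forward pass that builds the prefix string incrementally and records the deepest depth whose prefix already exists, returning num_dir - deepest.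
import Mathlib
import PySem

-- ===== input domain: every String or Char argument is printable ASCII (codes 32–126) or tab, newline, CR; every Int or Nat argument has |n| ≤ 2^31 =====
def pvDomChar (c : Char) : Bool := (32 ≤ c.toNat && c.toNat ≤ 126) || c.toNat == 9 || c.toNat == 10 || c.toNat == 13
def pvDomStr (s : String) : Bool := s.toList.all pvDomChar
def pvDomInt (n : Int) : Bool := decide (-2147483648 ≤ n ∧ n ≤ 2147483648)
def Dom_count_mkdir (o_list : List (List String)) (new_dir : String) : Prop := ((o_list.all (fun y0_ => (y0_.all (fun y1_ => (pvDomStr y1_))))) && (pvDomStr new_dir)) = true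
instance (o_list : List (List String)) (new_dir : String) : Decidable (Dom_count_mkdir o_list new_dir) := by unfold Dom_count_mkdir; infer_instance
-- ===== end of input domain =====

-- B replaces A's backward countdown-with-early-return by a single forward pass that
-- records the deepest existing pfx depth (objective: simpler); return value only.

-- ===== PORT A =====
-- strings are handled as List Char throughout (PySem.Chars), exact on the ASCII domain
def dir_len (dir : String) : Nat := PySem.Str.count dir "/"

def take_n (list_dir : List (List Char)) (n : Nat) : List Char :=
  '/' :: PySem.Chars.join ['/'] ((List.range n).map (fun x => list_dir.getD x []))

-- the while(n>0) loop of A: counter n, accumulator sum_mkdir; early return on a hit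
def count_mkdir_loop (o_list : List (List String)) (s_dir : List (List Char))
    (num_dir : Int) : Nat → Int → Int
  | 0, _ => num_dir
  | Nat.succ k, sum =>
      let part := take_n s_dir (k + 1)
      if part ∈ (o_list.getD k []).map String.toList then sum
      else count_mkdir_loop o_list s_dir num_dir k (sum + 1)

def count_mkdir (o_list : List (List String)) (new_dir : String) : Int :=
  let num_dir := dir_len new_dir
  let s_dir := (PySem.List.slice ((PySem.Str.split? new_dir "/").getD []) (some 1) none).map String.toList
  let n := o_list.length
  let ms : Nat × Int := if num_dir > n then (n, (num_dir : Int) - n) else (num_dir, 0)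
  count_mkdir_loop o_list s_dir (num_dir : Int) ms.1 ms.2

-- ===== PORT B =====
def count_mkdir_alt (o_list : List (List String)) (new_dir : String) : Int :=
  let num_dir := PySem.Str.count new_dir "/"
  let parts := (PySem.List.slice ((PySem.Str.split? new_dir "/").getD []) (some 1) none).map String.toList
  let st := (List.range (min num_dir o_list.length)).foldl
      (fun (st : List Char × Nat) i =>
        let pfx := st.1 ++ '/' :: parts.getD i []
        (pfx, if pfx ∈ (o_list.getD i []).map String.toList then i + 1 else st.2))
      ([], 0)
  (num_dir : Int) - st.2

-- ===== PRECONDITION & SPEC =====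
def Spec_count_mkdir (o_list : List (List String)) (new_dir : String) (out : Int) : Prop := out = count_mkdir_alt o_list new_dir
instance (o_list : List (List String)) (new_dir : String) (out : Int) : Decidable (Spec_count_mkdir o_list new_dir out) := by unfold Spec_count_mkdir; infer_instance

-- ===== CLAIM (what is proved, stated in full; the proofs are below) =====
def Claim_equal_count_mkdir : Prop := ∀ (o_list : List (List String)) (new_dir : String), Dom_count_mkdir o_list new_dir → Spec_count_mkdir o_list new_dir (count_mkdir o_list new_dir)

-- ===== LEMMAS AND PROOFS =====

-- the incremental pfx of B
def bpfx (parts : List (List Char)) : Nat → List Char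
  | 0 => []
  | Nat.succ i => bpfx parts i ++ '/' :: parts.getD i []

-- the "deepest existing pfx" accumulator of B, as a recursion
def bdeep (o_list : List (List String)) (parts : List (List Char)) : Nat → Nat
  | 0 => 0
  | Nat.succ i => if bpfx parts (i + 1) ∈ (o_list.getD i []).map String.toList
                  then i + 1 else bdeep o_list parts i

theorem join_slash_append_singleton (l : List (List Char)) (a : List Char) (h : l ≠ []) :
    PySem.Chars.join ['/'] (l ++ [a]) = PySem.Chars.join ['/'] l ++ '/' :: a := by
  induction l with
  | nil => simp at h
  | cons x t ih =>
      cases t with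
      | nil => simp [PySem.Chars.join_cons_cons, PySem.Chars.join_singleton]
      | cons y u =>
          simp only [List.cons_append]
          rw [PySem.Chars.join_cons_cons, PySem.Chars.join_cons_cons,
              ← List.cons_append, ih (by simp)]
          simp

theorem bpfx_eq_take_n (parts : List (List Char)) (i : Nat) :
    bpfx parts (i + 1) = take_n parts (i + 1) := by
  induction i with
  | zero => simp [bpfx, take_n, PySem.Chars.join_singleton]
  | succ k ih =>
      show bpfx parts (k + 1) ++ _ = _
      rw [ih]
      simp only [take_n, List.range_succ (n := k + 1), List.map_append, List.map_cons,
        List.map_nil]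
      rw [join_slash_append_singleton _ _ (by simp [List.range_succ])]
      simp

theorem foldl_state (o_list : List (List String)) (parts : List (List Char)) (m : Nat) :
    (List.range m).foldl
      (fun (st : List Char × Nat) i =>
        let pfx := st.1 ++ '/' :: parts.getD i []
        (pfx, if pfx ∈ (o_list.getD i []).map String.toList then i + 1 else st.2))
      ([], 0)
    = (bpfx parts m, bdeep o_list parts m) := by
  induction m with
  | zero => simp [bpfx, bdeep]
  | succ k ih =>
      rw [List.range_succ, List.foldl_append, ih]
      simp [bpfx, bdeep]

theorem loop_eq (o_list : List (List String)) (parts : List (List Char)) (num : Int) :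
    ∀ (k : Nat) (sum : Int),
      count_mkdir_loop o_list parts num k sum
        = if bdeep o_list parts k = 0 then num else sum + ((k : Int) - bdeep o_list parts k) := by
  intro k
  induction k with
  | zero => intro sum; simp [count_mkdir_loop, bdeep]
  | succ j ih =>
      intro sum
      rw [count_mkdir_loop]
      show (if take_n parts (j + 1) ∈ (o_list.getD j []).map String.toList then sum
            else count_mkdir_loop o_list parts num j (sum + 1)) = _
      rw [bdeep, bpfx_eq_take_n]
      by_cases h : take_n parts (j + 1) ∈ (o_list.getD j []).map String.toList
      · rw [if_pos h, if_pos h, if_neg (by omega)]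
        push_cast; ring
      · rw [if_neg h, if_neg h, ih]
        split_ifs with h0
        · rfl
        · push_cast; ring

-- ===== VERDICT (by name: the statement is the Claim_ definition above) =====
theorem count_mkdir_spec : Claim_equal_count_mkdir := by
  intro o_list new_dir _
  unfold Spec_count_mkdir count_mkdir count_mkdir_alt
  simp only [foldl_state, loop_eq, dir_len]
  by_cases h : PySem.Str.count new_dir "/" > o_list.length
  · rw [if_pos h, Nat.min_eq_right (Nat.le_of_lt h)]
    split_ifs with h0
    · rw [h0]; simp
    · ring
  · rw [if_neg h, Nat.min_eq_left (Nat.le_of_not_lt h)]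
    split_ifs with h0
    · rw [h0]; simp
    · ring
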